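-- pv_equiv track=rewrite | github.com/LuisHenriique/Advanced-Algorithms-and-Applications | Class/2908.py | turn_on
-- ===== SOURCE A (Python) =====
-- def turn_on(bulbs):
--     cost  = 0
--     for i in range(len(bulbs)):
--         b = bulbs[i]
--         if cost % 2 != 0:
--             b = -b
--         if b == -1:
--             cost += 1
--     return cost
-- ===== SOURCE B (Python) =====
-- def turn_on(bulbs):
--     s = [1] + [b for b in bulbs if b == 1 or b == -1]
--     return sum(x != y for x, y in zip(s, s[1:]))
-- ===== Notes on version B (the rewrite author's own statement) =====
-- stated objective: alternative
-- what changed: Replaces the stateful loop that re-negates each bulb by the running flip parity with two stateless staged passes: filter the list to its +/-1 values, prepend a virtual 1, and count adjacent unequal pairs by zipping the list with its own shift.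
import Mathlib
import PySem

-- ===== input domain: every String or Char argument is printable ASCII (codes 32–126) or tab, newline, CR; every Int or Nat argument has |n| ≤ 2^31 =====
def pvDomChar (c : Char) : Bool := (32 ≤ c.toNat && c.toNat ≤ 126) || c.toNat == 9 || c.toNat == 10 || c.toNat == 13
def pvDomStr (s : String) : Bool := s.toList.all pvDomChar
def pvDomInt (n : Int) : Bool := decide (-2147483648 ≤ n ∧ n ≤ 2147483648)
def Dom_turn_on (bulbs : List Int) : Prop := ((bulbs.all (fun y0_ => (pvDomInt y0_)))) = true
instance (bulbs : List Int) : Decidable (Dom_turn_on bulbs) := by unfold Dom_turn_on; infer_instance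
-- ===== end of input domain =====

-- B replaces A's stateful parity-negating loop with two stateless passes (filter to ±1, then count
-- adjacent unequal pairs of the list zipped with its own shift); same O(n) cost, different decomposition.

-- ===== PORT A =====
def turn_on (bulbs : List Int) : Int :=
  (PySem.List.pyRange 0 (bulbs.length : Int) 1).foldl (fun cost i =>
    let b := PySem.List.pyGetD bulbs i 0
    let b := if PySem.Int.mod cost 2 ≠ 0 then -b else b
    if b = -1 then cost + 1 else cost) 0

-- ===== PORT B =====
-- sum(x != y for x, y in zip(s, s[1:])): s[1:] = s.drop 1 (exact for a slice from a nonnegative start)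
def pvPairSum (s : List Int) : Int :=
  ((s.zip (s.drop 1)).map (fun p => if p.1 ≠ p.2 then (1 : Int) else 0)).sum

def turn_on_alt (bulbs : List Int) : Int :=
  pvPairSum (1 :: bulbs.filter (fun b => b = 1 ∨ b = -1))

-- ===== PRECONDITION & SPEC =====
def Spec_turn_on (bulbs : List Int) (out : Int) : Prop := out = turn_on_alt bulbs
instance (bulbs : List Int) (out : Int) : Decidable (Spec_turn_on bulbs out) := by unfold Spec_turn_on; infer_instance

-- ===== CLAIM (what is proved, stated in full; the proofs are below) =====
def Claim_equal_turn_on : Prop := ∀ (bulbs : List Int), Dom_turn_on bulbs → Spec_turn_on bulbs (turn_on bulbs)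

-- ===== LEMMAS AND PROOFS =====

theorem pvPairSum_cons_cons (a b : Int) (t : List Int) :
    pvPairSum (a :: b :: t) = (if a ≠ b then 1 else 0) + pvPairSum (b :: t) := by
  simp [pvPairSum]

theorem turn_on_key (l : List Int) (cost prev : Int)
    (h : (prev = 1 ∧ cost % 2 = 0) ∨ (prev = -1 ∧ cost % 2 = 1)) :
    l.foldl (fun cost b =>
      let b := if PySem.Int.mod cost 2 ≠ 0 then -b else b
      if b = -1 then cost + 1 else cost) cost
    = cost + pvPairSum (prev :: l.filter (fun b => b = 1 ∨ b = -1)) := by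
  induction l generalizing cost prev with
  | nil => simp [pvPairSum]
  | cons b t ih =>
    simp only [List.foldl_cons, List.filter_cons]
    rw [PySem.Int.mod_eq_emod_of_pos (by omega : (0:Int) < 2)]
    rcases eq_or_ne b 1 with hb1 | hb1
    · subst hb1
      rcases h with ⟨hp, hm⟩ | ⟨hp, hm⟩ <;> subst hp <;>
        simp only [decide_eq_true_eq, true_or, if_pos, pvPairSum_cons_cons] <;>
        simp_all
      · rw [ih cost 1 (Or.inl ⟨rfl, hm⟩)]
      · rw [ih (cost + 1) 1 (Or.inl ⟨rfl, by omega⟩)]; ring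
    · rcases eq_or_ne b (-1) with hbm | hbm
      · subst hbm
        rcases h with ⟨hp, hm⟩ | ⟨hp, hm⟩ <;> subst hp <;>
          simp only [decide_eq_true_eq, or_true, if_pos, pvPairSum_cons_cons] <;>
          simp_all
        · rw [ih (cost + 1) (-1) (Or.inr ⟨rfl, by omega⟩)]; ring
        · rw [ih cost (-1) (Or.inr ⟨rfl, hm⟩)]
      · have hfilter : ¬ (b = 1 ∨ b = -1) := by tauto
        rcases h with ⟨hp, hm⟩ | ⟨hp, hm⟩ <;> subst hp <;> simp_all
        · exact ih cost 1 (Or.inl ⟨rfl, hm⟩)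
        · have : -b ≠ -1 := by omega
          simp_all
          exact ih cost (-1) (Or.inr ⟨rfl, hm⟩)

-- ===== VERDICT (by name: the statement is the Claim_ definition above) =====
theorem turn_on_spec : Claim_equal_turn_on := by
  intro bulbs _
  unfold Spec_turn_on turn_on turn_on_alt
  rw [PySem.List.foldl_pyRange_zero_pyGetD' bulbs 0
    (fun cost b => let b := if PySem.Int.mod cost 2 ≠ 0 then -b else b
                   if b = -1 then cost + 1 else cost) 0]
  rw [turn_on_key bulbs 0 1 (Or.inl ⟨rfl, rfl⟩)]
  ring
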